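-- pv_equiv track=rewrite | github.com/Pppp1116/Arixa | astra/lsp.py | _canonical_type_name
-- ===== SOURCE A (Python) =====
-- def _canonical_type_name(typ: str) -> str:
--     t = str(typ).strip()
--     if not t:
--         return t
--     if t.endswith("?"):
--         return f"{_canonical_type_name(t[:-1])} | none"
--     if t.startswith("Option<") and t.endswith(">"):
--         inner = t[len("Option<") : -1].strip()
--         return f"{_canonical_type_name(inner)} | none"
--     if t.startswith("&mut "):
--         return f"&mut {_canonical_type_name(t[5:])}"
--     if t.startswith("&"):
--         return f"&{_canonical_type_name(t[1:])}"
--     if t.startswith("Vec<") and t.endswith(">"):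
--         return f"Vec<{_canonical_type_name(t[4:-1])}>"
--     return t
-- ===== SOURCE B (Python) =====
-- _RULES = [
--     ("", "?", "", " | none"),
--     ("Option<", ">", "", " | none"),
--     ("&mut ", "", "&mut ", ""),
--     ("&", "", "&", ""),
--     ("Vec<", ">", "Vec<", ">"),
-- ]
--
--
-- def _canonical_type_name(typ: str) -> str:
--     t = str(typ).strip()
--     layers = []
--     while t:
--         rule = next((r for r in _RULES
--                      if t.startswith(r[0]) and t.endswith(r[1])), None)
--         if rule is None:
--             break
--         layers.append(rule)
--         t = t[len(rule[0]): len(t) - len(rule[1])].strip()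
--     out = t
--     for _, _, left, right in reversed(layers):
--         out = left + out + right
--     return out
-- ===== Notes on version B (the rewrite author's own statement) =====
-- stated objective: alternative
-- what changed: Replaced A's six-branch self-recursion with a data-driven rewrite: a table of (left-marker, right-marker, left-output, right-output) rules, a loop that peels matching rules into a layers list with one generic slice, and a final fold over the reversed layers that renders the result.
import Mathlib
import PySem

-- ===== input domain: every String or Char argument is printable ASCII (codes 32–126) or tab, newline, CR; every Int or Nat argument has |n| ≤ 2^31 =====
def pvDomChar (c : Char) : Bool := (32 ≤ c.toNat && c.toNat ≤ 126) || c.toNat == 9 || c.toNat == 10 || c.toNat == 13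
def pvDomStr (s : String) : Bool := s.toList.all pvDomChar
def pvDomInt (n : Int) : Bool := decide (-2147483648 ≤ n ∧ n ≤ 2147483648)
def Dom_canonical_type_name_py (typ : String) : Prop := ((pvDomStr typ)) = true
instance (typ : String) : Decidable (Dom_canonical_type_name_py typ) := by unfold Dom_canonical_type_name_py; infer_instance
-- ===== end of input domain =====

-- B replaces A's six-branch self-recursion by a data-driven rule table, a peeling loop
-- collecting matched rules, and a final fold rendering the result (objective: alternative; same cost).

-- ===== PORT A =====
-- helper lemmas used only by the ports' termination proofs
theorem pv_strip_len_le (cs : List Char) : (PySem.Chars.strip cs).length ≤ cs.length := by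
  simp only [PySem.Chars.strip, PySem.Chars.rstrip, PySem.Chars.lstrip, List.length_reverse]
  calc (List.dropWhile PySem.Chars.isspace (List.dropWhile PySem.Chars.isspace cs).reverse).length
      ≤ (List.dropWhile PySem.Chars.isspace cs).reverse.length := List.length_dropWhile_le _ _
    _ ≤ cs.length := by simpa using List.length_dropWhile_le _ cs

theorem pv_strip_ne_len_pos {cs : List Char} (h : PySem.Chars.strip cs ≠ []) : 1 ≤ cs.length := by
  cases cs with
  | nil => simp [PySem.Chars.strip, PySem.Chars.rstrip, PySem.Chars.lstrip] at h
  | cons c cs => simp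

theorem pv_slice_len_neg_one {cs : List Char} (a : Int) (_ha : 0 ≤ a) :
    (PySem.List.slice cs (some a) (some (-1))).length ≤ cs.length - 1 := by
  have := PySem.List.length_slice cs a (-1)
  have h1 : PySem.List.clampIdx cs.length (-1) = cs.length - 1 := PySem.List.clampIdx_neg_one _
  omega

def pvCanonA (typ : List Char) : List Char :=
  let t := PySem.Chars.strip typ
  if _h : t = [] then t
  else if PySem.Chars.endswith t "?".toList then
    pvCanonA (PySem.List.slice t none (some (-1))) ++ " | none".toList
  else if PySem.Chars.startswith t "Option<".toList && PySem.Chars.endswith t ">".toList then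
    pvCanonA (PySem.Chars.strip (PySem.List.slice t (some 7) (some (-1)))) ++ " | none".toList
  else if PySem.Chars.startswith t "&mut ".toList then
    "&mut ".toList ++ pvCanonA (PySem.List.slice t (some 5) none)
  else if PySem.Chars.startswith t "&".toList then
    "&".toList ++ pvCanonA (PySem.List.slice t (some 1) none)
  else if PySem.Chars.startswith t "Vec<".toList && PySem.Chars.endswith t ">".toList then
    "Vec<".toList ++ pvCanonA (PySem.List.slice t (some 4) (some (-1))) ++ ">".toList
  else t
termination_by typ.length
decreasing_by
  · have h1 := pv_strip_len_le typ
    have h2 := pv_strip_ne_len_pos _h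
    rw [PySem.List.slice_to_neg_one]
    simp only [List.length_dropLast]
    omega
  · have h1 := pv_strip_len_le typ
    have h2 := pv_strip_ne_len_pos _h
    have h3 := pv_strip_len_le (PySem.List.slice (PySem.Chars.strip typ) (some 7) (some (-1)))
    have h4 := pv_slice_len_neg_one (cs := PySem.Chars.strip typ) 7 (by norm_num)
    omega
  · have h1 := pv_strip_len_le typ
    have h2 := pv_strip_ne_len_pos _h
    rw [PySem.List.slice_from _ (by norm_num)]
    simp only [List.length_drop]
    omega
  · have h1 := pv_strip_len_le typ
    have h2 := pv_strip_ne_len_pos _h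
    rw [PySem.List.slice_from _ (by norm_num)]
    simp only [List.length_drop]
    omega
  · have h1 := pv_strip_len_le typ
    have h2 := pv_strip_ne_len_pos _h
    have h4 := pv_slice_len_neg_one (cs := PySem.Chars.strip typ) 4 (by norm_num)
    omega

def canonical_type_name_py (typ : String) : String := String.ofList (pvCanonA typ.toList)

-- ===== PORT B =====
-- a rule is (left marker, right marker, left output, right output), as in Source B's _RULES
abbrev PvRule := List Char × List Char × List Char × List Char

def pvRules : List PvRule :=
  [([], "?".toList, [], " | none".toList),
   ("Option<".toList, ">".toList, [], " | none".toList),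
   ("&mut ".toList, [], "&mut ".toList, []),
   ("&".toList, [], "&".toList, []),
   ("Vec<".toList, ">".toList, "Vec<".toList, ">".toList)]

def pvFindRule (t : List Char) : Option PvRule :=
  pvRules.find? (fun r => PySem.Chars.startswith t r.1 && PySem.Chars.endswith t r.2.1)

theorem pv_peel_dec {t : List Char} {r : PvRule} (hne : t ≠ [])
    (hr : pvFindRule t = some r) :
    (PySem.Chars.strip (PySem.List.slice t (some (r.1.length : Int))
        (some ((t.length : Int) - (r.2.1.length : Int))))).length < t.length := by
  have hp := List.find?_some hr
  have hmem := List.mem_of_find?_eq_some hr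
  rw [Bool.and_eq_true] at hp
  have hpre : r.1.length ≤ t.length :=
    ((PySem.Chars.startswith_iff _ _).mp hp.1).length_le
  have hsuf : r.2.1.length ≤ t.length :=
    ((PySem.Chars.endswith_iff _ _).mp hp.2).length_le
  have hsum : ∀ x ∈ pvRules, 1 ≤ x.1.length + x.2.1.length := by decide
  have h1 := hsum r hmem
  have hlt : 1 ≤ t.length := by
    cases t with
    | nil => exact absurd rfl hne
    | cons c cs => simp
  have hb : ((t.length : Int) - (r.2.1.length : Int)) = ((t.length - r.2.1.length : Nat) : Int) := by
    omega
  rw [hb]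
  have hlen := PySem.List.length_slice t (r.1.length : Int) ((t.length - r.2.1.length : Nat) : Int)
  rw [PySem.List.clampIdx_natCast, PySem.List.clampIdx_natCast,
    Nat.min_eq_left (Nat.sub_le _ _), Nat.min_eq_left hpre] at hlen
  have hstrip := pv_strip_len_le (PySem.List.slice t (some (r.1.length : Int))
      (some ((t.length - r.2.1.length : Nat) : Int)))
  omega

def pvPeel (t : List Char) (layers : List PvRule) : List PvRule × List Char :=
  if hne : t = [] then (layers, t)
  else
    match hr : pvFindRule t with
    | none => (layers, t)
    | some r =>
        pvPeel (PySem.Chars.strip (PySem.List.slice t (some (r.1.length : Int))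
            (some ((t.length : Int) - (r.2.1.length : Int))))) (layers ++ [r])
termination_by t.length
decreasing_by exact pv_peel_dec hne hr

def pvApply (out : List Char) (r : PvRule) : List Char := r.2.2.1 ++ out ++ r.2.2.2

def canonical_type_name_py_alt (typ : String) : String :=
  let p := pvPeel (PySem.Chars.strip typ.toList) []
  String.ofList (p.1.reverse.foldl pvApply p.2)

-- ===== PRECONDITION & SPEC =====
def Spec_canonical_type_name_py (typ : String) (out : String) : Prop := out = canonical_type_name_py_alt typ
instance (typ : String) (out : String) : Decidable (Spec_canonical_type_name_py typ out) := by unfold Spec_canonical_type_name_py; infer_instance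

-- ===== CLAIM (what is proved, stated in full; the proofs are below) =====
def Claim_equal_canonical_type_name_py : Prop := ∀ (typ : String), Dom_canonical_type_name_py typ → Spec_canonical_type_name_py typ (canonical_type_name_py typ)

-- ===== LEMMAS AND PROOFS =====
theorem pv_dropWhile_idem (p : Char → Bool) (l : List Char) :
    List.dropWhile p (List.dropWhile p l) = List.dropWhile p l := by
  induction l with
  | nil => simp
  | cons c cs ih =>
    by_cases h : p c <;> simp [h, ih]

theorem pv_dropWhile_prefix (p : Char → Bool) {l l' : List Char}
    (h : List.dropWhile p l = l) (hp : l' <+: l) : List.dropWhile p l' = l' := by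
  cases l' with
  | nil => simp
  | cons c cs =>
    obtain ⟨r, hr⟩ := hp
    subst hr
    rw [List.cons_append, List.dropWhile_cons] at h
    by_cases hpc : p c
    · exfalso
      rw [if_pos hpc] at h
      have hle := List.length_dropWhile_le p (cs ++ r)
      rw [h] at hle
      simp at hle
    · simp [hpc]

theorem pv_rstrip_prefix (z : List Char) : PySem.Chars.rstrip z <+: z := by
  have hsuf : List.dropWhile PySem.Chars.isspace z.reverse <:+ z.reverse :=
    List.dropWhile_suffix _
  have := (List.reverse_prefix (l₁ := List.dropWhile PySem.Chars.isspace z.reverse)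
      (l₂ := z.reverse)).2 hsuf
  simpa [PySem.Chars.rstrip] using this

theorem pv_strip_idem (cs : List Char) :
    PySem.Chars.strip (PySem.Chars.strip cs) = PySem.Chars.strip cs := by
  simp only [PySem.Chars.strip]
  have hl : PySem.Chars.lstrip (PySem.Chars.rstrip (PySem.Chars.lstrip cs))
      = PySem.Chars.rstrip (PySem.Chars.lstrip cs) := by
    apply pv_dropWhile_prefix (h := ?_) (hp := pv_rstrip_prefix _)
    simp [PySem.Chars.lstrip, pv_dropWhile_idem]
  rw [hl]
  simp only [PySem.Chars.rstrip, List.reverse_reverse, pv_dropWhile_idem]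

theorem pv_canonA_strip (cs : List Char) : pvCanonA (PySem.Chars.strip cs) = pvCanonA cs := by
  conv_lhs => rw [pvCanonA.eq_def]
  conv_rhs => rw [pvCanonA.eq_def]
  rw [pv_strip_idem]

theorem pv_startswith_nil (t : List Char) : PySem.Chars.startswith t [] = true :=
  (PySem.Chars.startswith_iff _ _).mpr List.nil_prefix

theorem pv_endswith_nil (t : List Char) : PySem.Chars.endswith t [] = true :=
  (PySem.Chars.endswith_iff _ _).mpr List.nil_suffix

theorem pv_render_snoc (layers : List PvRule) (r : PvRule) (core : List Char) :
    (layers ++ [r]).reverse.foldl pvApply core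
      = layers.reverse.foldl pvApply (pvApply core r) := by
  simp

-- the generic slice of the peel loop coincides with A's slice, per end-marker shape
theorem pv_slice_end_one {t : List Char} (a? : Option Int) (hne : t ≠ []) :
    PySem.List.slice t a? (some ((t.length : Int) - 1))
      = PySem.List.slice t a? (some (-1)) := by
  have hlt : 1 ≤ t.length := by
    cases t with
    | nil => exact absurd rfl hne
    | cons c cs => simp
  have hb : ((t.length : Int) - 1) = ((t.length - 1 : Nat) : Int) := by omega
  simp [PySem.List.slice, hb]

theorem pv_slice_end_zero (t : List Char) (a? : Option Int) :
    PySem.List.slice t a? (some (t.length : Int))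
      = PySem.List.slice t a? none := by
  simp [PySem.List.slice]

theorem pv_peel_render (n : Nat) : ∀ t : List Char, t.length ≤ n →
    PySem.Chars.strip t = t → ∀ layers : List PvRule,
    (pvPeel t layers).1.reverse.foldl pvApply (pvPeel t layers).2
      = layers.reverse.foldl pvApply (pvCanonA t) := by
  induction n with
  | zero =>
    intro t ht hs layers
    have : t = [] := List.eq_nil_of_length_eq_zero (by omega)
    subst this
    rw [pvPeel.eq_def, pvCanonA.eq_def]
    simp [PySem.Chars.strip, PySem.Chars.rstrip, PySem.Chars.lstrip]
  | succ n ih =>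
    intro t ht hs layers
    by_cases hne : t = []
    · subst hne
      rw [pvPeel.eq_def, pvCanonA.eq_def]
      simp [PySem.Chars.strip, PySem.Chars.rstrip, PySem.Chars.lstrip]
    · rw [pvPeel.eq_def, dif_neg hne]
      conv_rhs => rw [pvCanonA.eq_def]
      simp only [hs]
      rw [dif_neg hne]
      by_cases h1 : PySem.Chars.endswith t "?".toList = true
      · have h1' : PySem.Chars.endswith t ['?'] = true := h1
        have hfind : pvFindRule t = some ([], "?".toList, [], " | none".toList) := by
          simp [pvFindRule, pvRules, pv_startswith_nil, h1']
        rw [if_pos h1]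
        split
        · next heq => rw [hfind] at heq; simp at heq
        · next r heq =>
          rw [hfind] at heq
          obtain rfl := Option.some.inj heq
          have hdec := pv_peel_dec hne hfind
          rw [ih _ (by omega) (pv_strip_idem _), pv_render_snoc]
          simp only [pvApply, List.nil_append]
          have hsl : PySem.List.slice t (some ((List.length ([] : List Char) : Nat) : Int))
              (some ((t.length : Int) - ((List.length "?".toList : Nat) : Int)))
              = PySem.List.slice t none (some (-1)) := by
            have : ((List.length "?".toList : Nat) : Int) = 1 := by decide
            rw [this, pv_slice_end_one _ hne]
            norm_num
          rw [hsl, pv_canonA_strip]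
      · have h1' : PySem.Chars.endswith t ['?'] = false := by simpa using h1
        rw [if_neg h1]
        by_cases h2 : (PySem.Chars.startswith t "Option<".toList && PySem.Chars.endswith t ">".toList) = true
        · have h2' : (PySem.Chars.startswith t ['O','p','t','i','o','n','<'] && PySem.Chars.endswith t ['>']) = true := h2
          have hfind : pvFindRule t = some ("Option<".toList, ">".toList, [], " | none".toList) := by
            simp [pvFindRule, pvRules, pv_startswith_nil, h1', h2']
          rw [if_pos h2]
          split
          · next heq => rw [hfind] at heq; simp at heq
          · next r heq =>
            rw [hfind] at heq
            obtain rfl := Option.some.inj heq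
            have hdec := pv_peel_dec hne hfind
            rw [ih _ (by omega) (pv_strip_idem _), pv_render_snoc]
            simp only [pvApply, List.nil_append]
            have hsl : PySem.List.slice t (some ((List.length "Option<".toList : Nat) : Int))
                (some ((t.length : Int) - ((List.length ">".toList : Nat) : Int)))
                = PySem.List.slice t (some 7) (some (-1)) := by
              have e1 : ((List.length "Option<".toList : Nat) : Int) = 7 := by decide
              have e2 : ((List.length ">".toList : Nat) : Int) = 1 := by decide
              rw [e1, e2, pv_slice_end_one _ hne]
            rw [hsl]
        · have h2' : (PySem.Chars.startswith t ['O','p','t','i','o','n','<'] && PySem.Chars.endswith t ['>']) = false := by simpa using h2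
          rw [if_neg h2]
          by_cases h3 : PySem.Chars.startswith t "&mut ".toList = true
          · have h3' : PySem.Chars.startswith t ['&','m','u','t',' '] = true := h3
            have hfind : pvFindRule t = some ("&mut ".toList, [], "&mut ".toList, []) := by
              simp [pvFindRule, pvRules, pv_startswith_nil, pv_endswith_nil, h1', h2', h3']
            rw [if_pos h3]
            split
            · next heq => rw [hfind] at heq; simp at heq
            · next r heq =>
              rw [hfind] at heq
              obtain rfl := Option.some.inj heq
              have hdec := pv_peel_dec hne hfind
              rw [ih _ (by omega) (pv_strip_idem _), pv_render_snoc]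
              simp only [pvApply, List.append_nil]
              have hsl : PySem.List.slice t (some ((List.length "&mut ".toList : Nat) : Int))
                  (some ((t.length : Int) - ((List.length ([] : List Char) : Nat) : Int)))
                  = PySem.List.slice t (some 5) none := by
                have e1 : ((List.length "&mut ".toList : Nat) : Int) = 5 := by decide
                have e2 : ((t.length : Int) - ((List.length ([] : List Char) : Nat) : Int)) = (t.length : Int) := by
                  norm_num
                rw [e1, e2, pv_slice_end_zero]
              rw [hsl, pv_canonA_strip]
          · have h3' : PySem.Chars.startswith t ['&','m','u','t',' '] = false := by simpa using h3
            rw [if_neg h3]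
            by_cases h4 : PySem.Chars.startswith t "&".toList = true
            · have h4' : PySem.Chars.startswith t ['&'] = true := h4
              have hfind : pvFindRule t = some ("&".toList, [], "&".toList, []) := by
                simp [pvFindRule, pvRules, pv_startswith_nil, pv_endswith_nil, h1', h2', h3', h4']
              rw [if_pos h4]
              split
              · next heq => rw [hfind] at heq; simp at heq
              · next r heq =>
                rw [hfind] at heq
                obtain rfl := Option.some.inj heq
                have hdec := pv_peel_dec hne hfind
                rw [ih _ (by omega) (pv_strip_idem _), pv_render_snoc]
                simp only [pvApply, List.append_nil]
                have hsl : PySem.List.slice t (some ((List.length "&".toList : Nat) : Int))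
                    (some ((t.length : Int) - ((List.length ([] : List Char) : Nat) : Int)))
                    = PySem.List.slice t (some 1) none := by
                  have e1 : ((List.length "&".toList : Nat) : Int) = 1 := by decide
                  have e2 : ((t.length : Int) - ((List.length ([] : List Char) : Nat) : Int)) = (t.length : Int) := by
                    norm_num
                  rw [e1, e2, pv_slice_end_zero]
                rw [hsl, pv_canonA_strip]
            · have h4' : PySem.Chars.startswith t ['&'] = false := by simpa using h4
              rw [if_neg h4]
              by_cases h5 : (PySem.Chars.startswith t "Vec<".toList && PySem.Chars.endswith t ">".toList) = true
              · have h5' : (PySem.Chars.startswith t ['V','e','c','<'] && PySem.Chars.endswith t ['>']) = true := h5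
                have hfind : pvFindRule t = some ("Vec<".toList, ">".toList, "Vec<".toList, ">".toList) := by
                  simp [pvFindRule, pvRules, pv_startswith_nil, pv_endswith_nil, h1', h2', h3', h4', h5']
                rw [if_pos h5]
                split
                · next heq => rw [hfind] at heq; simp at heq
                · next r heq =>
                  rw [hfind] at heq
                  obtain rfl := Option.some.inj heq
                  have hdec := pv_peel_dec hne hfind
                  rw [ih _ (by omega) (pv_strip_idem _), pv_render_snoc]
                  simp only [pvApply]
                  have hsl : PySem.List.slice t (some ((List.length "Vec<".toList : Nat) : Int))
                      (some ((t.length : Int) - ((List.length ">".toList : Nat) : Int)))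
                      = PySem.List.slice t (some 4) (some (-1)) := by
                    have e1 : ((List.length "Vec<".toList : Nat) : Int) = 4 := by decide
                    have e2 : ((List.length ">".toList : Nat) : Int) = 1 := by decide
                    rw [e1, e2, pv_slice_end_one _ hne]
                  rw [hsl, pv_canonA_strip]
              · have h5' : (PySem.Chars.startswith t ['V','e','c','<'] && PySem.Chars.endswith t ['>']) = false := by simpa using h5
                rw [if_neg h5]
                have hfind : pvFindRule t = none := by
                  simp [pvFindRule, pvRules, pv_startswith_nil, pv_endswith_nil, h1', h2', h3', h4', h5']
                split
                · rfl
                · next r heq => rw [hfind] at heq; simp at heq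

-- ===== VERDICT (by name: the statement is the Claim_ definition above) =====
theorem canonical_type_name_py_spec : Claim_equal_canonical_type_name_py := by
  intro typ _
  unfold Spec_canonical_type_name_py canonical_type_name_py canonical_type_name_py_alt
  have h := pv_peel_render (PySem.Chars.strip typ.toList).length (PySem.Chars.strip typ.toList)
      le_rfl (pv_strip_idem _) []
  simp only [h, List.reverse_nil, List.foldl_nil, pv_canonA_strip]
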